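-- pv_equiv track=rewrite | github.com/q737645224/spyder | day08/queue_to_stacks.py | stacks_to_queue
-- ===== SOURCE A (Python) =====
-- def stacks_to_queue(L1,L2):
--     for i in range(len(L1)-1):
--         L2.append(L1.pop(0))
--     for i in range(len(L2)-1):
--         for i in range(len(L2)-1):
--             L2.append(L2.pop(0))
--         L1.append(L2.pop(0))
--     L1.append(L2.pop(0))
--     return L1
-- ===== SOURCE B (Python) =====
-- def stacks_to_queue(L1, L2):
--     # One pass: the whole dance just reverses L2's items followed by L1's.
--     res = (L2 + L1)[::-1]
--     L2.clear()
--     L1[:] = res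
--     return L1
-- ===== Notes on version B (the rewrite author's own statement) =====
-- stated objective: faster
-- what changed: Replaces the quadratic pop(0)/append rotation simulation with a single closed-form construction: the result is just reverse(L2 + L1), built in one pass.
import Mathlib
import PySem

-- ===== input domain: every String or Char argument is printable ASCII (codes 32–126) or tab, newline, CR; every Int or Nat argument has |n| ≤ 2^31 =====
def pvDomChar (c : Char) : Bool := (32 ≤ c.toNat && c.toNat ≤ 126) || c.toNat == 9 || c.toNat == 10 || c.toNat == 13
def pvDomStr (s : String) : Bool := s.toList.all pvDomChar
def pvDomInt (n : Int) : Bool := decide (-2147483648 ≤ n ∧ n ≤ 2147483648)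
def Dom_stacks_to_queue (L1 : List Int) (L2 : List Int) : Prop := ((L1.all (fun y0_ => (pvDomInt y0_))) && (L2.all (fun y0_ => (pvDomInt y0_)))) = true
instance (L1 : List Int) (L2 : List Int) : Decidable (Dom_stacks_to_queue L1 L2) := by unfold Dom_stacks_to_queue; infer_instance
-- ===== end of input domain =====

-- B is a one-pass closed form (reverse (L2 ++ L1)) replacing A's quadratic rotation
-- simulation; both Pythons mutate L1/L2 in place — the theorems are about the RETURN value only.

-- ===== PORT A =====
-- pop(0) on a list: returns (front element, rest).  Exact whenever the list is nonempty;
-- inside Pre_ every pop(0) that A executes is on a nonempty list (the empty case is where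
-- Python raises IndexError, excluded by Pre_).
def pyPop0 (l : List Int) : Int × List Int := (l.headD 0, l.drop 1)

def stacks_to_queue (L1 : List Int) (L2 : List Int) : List Int :=
  -- for i in range(len(L1)-1): L2.append(L1.pop(0))
  let s1 := (List.range (L1.length - 1)).foldl
    (fun (s : List Int × List Int) _ =>
      let p := pyPop0 s.1
      (p.2, s.2 ++ [p.1])) (L1, L2)
  -- for i in range(len(L2)-1): (inner rotation) ; L1.append(L2.pop(0))
  let s2 := (List.range (s1.2.length - 1)).foldl
    (fun (s : List Int × List Int) _ =>
      -- for i in range(len(L2)-1): L2.append(L2.pop(0))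
      let s' := (List.range (s.2.length - 1)).foldl
        (fun (t : List Int × List Int) _ =>
          let p := pyPop0 t.2
          (t.1, p.2 ++ [p.1])) s
      let p := pyPop0 s'.2
      (s'.1 ++ [p.1], p.2)) s1
  -- L1.append(L2.pop(0)); return L1
  let p := pyPop0 s2.2
  s2.1 ++ [p.1]

-- ===== PORT B =====
def stacks_to_queue_alt (L1 : List Int) (L2 : List Int) : List Int :=
  (L2 ++ L1).reverse

-- ===== PRECONDITION & SPEC =====
-- Pre_ excludes exactly the inputs where A raises IndexError (pop from empty list):
-- L2 empty together with L1 of length at most one.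
def Pre_stacks_to_queue (L1 : List Int) (L2 : List Int) : Prop :=
  L2 ≠ [] ∨ 2 ≤ L1.length
instance (L1 : List Int) (L2 : List Int) : Decidable (Pre_stacks_to_queue L1 L2) := by
  unfold Pre_stacks_to_queue; infer_instance

def pvWitness_stacks_to_queue : List Int × List Int := ([1, 2, 3], [7, 8])

def Spec_stacks_to_queue (L1 : List Int) (L2 : List Int) (out : List Int) : Prop :=
  out = stacks_to_queue_alt L1 L2
instance (L1 : List Int) (L2 : List Int) (out : List Int) : Decidable (Spec_stacks_to_queue L1 L2 out) := by
  unfold Spec_stacks_to_queue; infer_instance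

-- ===== CLAIM (what is proved, stated in full; the proofs are below) =====
def Claim_equal_stacks_to_queue : Prop := ∀ (L1 : List Int) (L2 : List Int), Dom_stacks_to_queue L1 L2 → Pre_stacks_to_queue L1 L2 → Spec_stacks_to_queue L1 L2 (stacks_to_queue L1 L2)

-- ===== LEMMAS AND PROOFS =====

-- named versions of the port's three loop bodies (definitionally equal to the inline lambdas)
def popStep (s : List Int × List Int) : List Int × List Int :=
  ((pyPop0 s.1).2, s.2 ++ [(pyPop0 s.1).1])
def rotStep (t : List Int) : List Int :=
  (pyPop0 t).2 ++ [(pyPop0 t).1]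
def outerF (s : List Int × List Int) : List Int × List Int :=
  let s' := (List.range (s.2.length - 1)).foldl
    (fun (t : List Int × List Int) _ => (t.1, rotStep t.2)) s
  (s'.1 ++ [(pyPop0 s'.2).1], (pyPop0 s'.2).2)

-- a foldl over List.range whose step ignores the index is an iterate
theorem foldl_range_iterate {a : Type} (f : a → a) (n : Nat) (x : a) :
    (List.range n).foldl (fun s _ => f s) x = f^[n] x := by
  induction n generalizing x with
  | zero => rfl
  | succ k ih =>
      rw [List.range_succ, List.foldl_append, ih, Function.iterate_succ_apply']
      rfl

-- phase 1: n pops from the front of a, appended to b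
theorem phase1_iterate (n : Nat) (a b : List Int) (h : n ≤ a.length) :
    popStep^[n] (a, b) = (a.drop n, b ++ a.take n) := by
  induction n generalizing a b with
  | zero => simp
  | succ k ih =>
      cases a with
      | nil => simp at h
      | cons x a' =>
          rw [Function.iterate_succ_apply]
          have := ih a' (b ++ [x]) (by simpa using h)
          simp [popStep, pyPop0] at this ⊢
          simpa using this

-- inner rotation: k front-to-back moves rotate the list left by k
theorem rot_iterate (k : Nat) (l : List Int) (h : k ≤ l.length) :
    rotStep^[k] l = l.drop k ++ l.take k := by
  induction k generalizing l with
  | zero => simp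
  | succ j ih =>
      cases l with
      | nil => simp at h
      | cons x l' =>
          rw [Function.iterate_succ_apply]
          have hj' : j ≤ l'.length := Nat.le_of_succ_le_succ h
          have := ih (l' ++ [x]) (by simp; omega)
          simp [rotStep, pyPop0] at this ⊢
          rw [this, List.drop_append_of_le_length hj', List.take_append_of_le_length hj']
          simp

-- the inner fold keeps the first component and rotates the second
theorem pair_rot (k : Nat) (s : List Int × List Int) :
    (List.range k).foldl
      (fun (t : List Int × List Int) _ => (t.1, rotStep t.2)) s
      = (s.1, rotStep^[k] s.2) := by
  rw [foldl_range_iterate (fun t : List Int × List Int => (t.1, rotStep t.2))]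
  induction k generalizing s with
  | zero => rfl
  | succ j ih =>
      rw [Function.iterate_succ_apply, Function.iterate_succ_apply, ih]

-- one outer step: rotate L2 fully then pop its front = move L2's LAST element onto L1
theorem outer_step (l1 l2 : List Int) (h : l2 ≠ []) :
    outerF (l1, l2) = (l1 ++ [l2.getLastD 0], l2.dropLast) := by
  unfold outerF
  simp only [pair_rot]
  rw [rot_iterate (l2.length - 1) l2 (Nat.sub_le _ _)]
  obtain ⟨l', x, rfl⟩ := (List.eq_nil_or_concat l2).resolve_left h
  simp [pyPop0]

-- the outer loop, k ≤ len l2 times: moves the last k elements of l2 (reversed) onto l1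
theorem outer_iterate (k : Nat) (l1 l2 : List Int) (h : k ≤ l2.length) :
    outerF^[k] (l1, l2)
      = (l1 ++ (l2.drop (l2.length - k)).reverse, l2.take (l2.length - k)) := by
  induction k generalizing l1 l2 with
  | zero => simp
  | succ j ih =>
      have hne : l2 ≠ [] := by
        intro hnil; subst hnil; simp at h
      rw [Function.iterate_succ_apply, outer_step l1 l2 hne]
      obtain ⟨l', x, rfl⟩ := (List.eq_nil_or_concat l2).resolve_left hne
      have hlen : (l'.concat x).length = l'.length + 1 := by simp
      have hj : j ≤ l'.length := by
        rw [hlen] at h; omega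
      rw [List.concat_eq_append, List.dropLast_concat, List.getLastD_concat,
        ih (l1 ++ [x]) l' hj]
      have hm : (l' ++ [x]).length - (j + 1) = l'.length - j := by simp
      rw [hm, List.take_append_of_le_length (by omega),
        List.drop_append_of_le_length (by omega)]
      simp

-- the tail element(s) of L1 followed by the reversed front is the whole reverse
theorem drop_rev_take (l : List Int) :
    l.drop (l.length - 1) ++ (l.take (l.length - 1)).reverse = l.reverse := by
  rcases List.eq_nil_or_concat l with rfl | ⟨l', x, rfl⟩
  · simp
  · simp

theorem stacks_to_queue_eq (L1 L2 : List Int) (h : Pre_stacks_to_queue L1 L2) :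
    stacks_to_queue L1 L2 = (L2 ++ L1).reverse := by
  simp only [stacks_to_queue]
  have e1 : (List.range (L1.length - 1)).foldl
      (fun (s : List Int × List Int) _ => ((pyPop0 s.1).2, s.2 ++ [(pyPop0 s.1).1])) (L1, L2)
      = popStep^[L1.length - 1] (L1, L2) :=
    foldl_range_iterate popStep _ _
  rw [e1, phase1_iterate (L1.length - 1) L1 L2 (Nat.sub_le _ _)]
  set Q : List Int := L2 ++ L1.take (L1.length - 1) with hQ
  set A1 : List Int := L1.drop (L1.length - 1) with hA1
  have hQlen : 1 ≤ Q.length := by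
    rw [hQ]
    rcases h with h | h
    · cases L2 with
      | nil => exact absurd rfl h
      | cons q Q' => simp
    · simp
      omega
  have e2 : (List.range (Q.length - 1)).foldl
      (fun (s : List Int × List Int) _ =>
        (((List.range (s.2.length - 1)).foldl
            (fun (t : List Int × List Int) _ => (t.1, (pyPop0 t.2).2 ++ [(pyPop0 t.2).1])) s).1
          ++ [(pyPop0 ((List.range (s.2.length - 1)).foldl
            (fun (t : List Int × List Int) _ => (t.1, (pyPop0 t.2).2 ++ [(pyPop0 t.2).1])) s).2).1],
         (pyPop0 ((List.range (s.2.length - 1)).foldl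
            (fun (t : List Int × List Int) _ => (t.1, (pyPop0 t.2).2 ++ [(pyPop0 t.2).1])) s).2).2))
      (A1, Q)
      = outerF^[Q.length - 1] (A1, Q) :=
    foldl_range_iterate outerF _ _
  rw [e2, outer_iterate (Q.length - 1) A1 Q (Nat.sub_le _ _)]
  have h1 : Q.length - (Q.length - 1) = 1 := by omega
  rw [h1]
  cases hc : Q with
  | nil => rw [hc] at hQlen; simp at hQlen
  | cons q Q' =>
      simp only [List.take_succ_cons, List.take_zero, List.drop_succ_cons, List.drop_zero,
        pyPop0, List.headD]
      have e3 : A1 ++ Q'.reverse ++ [q] = A1 ++ (q :: Q').reverse := by simp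
      rw [e3, ← hc, hQ, hA1, List.reverse_append, ← List.append_assoc, drop_rev_take,
        ← List.reverse_append]

-- ===== VERDICT (by name: the statement is the Claim_ definition above) =====
theorem stacks_to_queue_spec : Claim_equal_stacks_to_queue := by
  intro L1 L2 _ hpre
  unfold Spec_stacks_to_queue stacks_to_queue_alt
  exact stacks_to_queue_eq L1 L2 hpre
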